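-- pv_equiv track=rewrite | github.com/fightj/algorithm | 25.10.15 귤고르기.py | solution
-- ===== SOURCE A (Python) =====
-- def solution(k, tangerine):
--     answer = 0
--     a = set([])
--     for i in tangerine:
--         a.add(i)
--
--     b = []
--
--     for i in a:
--         b.append(tangerine.count(i))
--
--     b.sort()
--     t = 1
--     while k >0:
--         k -= b[len(b)-t]
--         answer +=1
--         t += 1
--
--     return answer
-- ===== SOURCE B (Python) =====
-- def solution(k, tangerine):
--     # Frequency of each size in one pass, then a histogram over count values
--     # (counting-sort style, no comparison sort), consumed from the largest
--     # count value down; each histogram bucket is settled with one ceiling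
--     # division instead of a per-kind loop.
--     freq = {}
--     for x in tangerine:
--         freq[x] = freq.get(x, 0) + 1
--     buckets = [0] * (len(tangerine) + 1)
--     for c in freq.values():
--         buckets[c] += 1
--     answer = 0
--     c = len(tangerine)
--     while c > 0 and k > 0:
--         m = buckets[c]
--         if m != 0:
--             t = min(m, -(-k // c))
--             answer += t
--             k -= t * c
--         c -= 1
--     return answer
-- ===== Notes on version B (the rewrite author's own statement) =====
-- stated objective: faster
-- what changed: B counts frequencies in one dict pass, builds a histogram of count values (counting-sort style, no comparison sort), and walks count values from n down, settling each bucket with one ceiling division (batched greedy) instead of A's per-distinct-value tangerine.count scan, list sort and per-kind backwards index walk.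
-- intended difference: When k exceeds len(tangerine) (but A still returns, i.e. k <= 2*len), A's b[len(b)-t] index goes negative and wraps around, counting some kinds twice, so A returns more than the number of distinct sizes; B returns the number of distinct sizes, the intended 'take every kind' answer. — e.g. on solution(2, [5]): A returns 2, B returns 1
import Mathlib
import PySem

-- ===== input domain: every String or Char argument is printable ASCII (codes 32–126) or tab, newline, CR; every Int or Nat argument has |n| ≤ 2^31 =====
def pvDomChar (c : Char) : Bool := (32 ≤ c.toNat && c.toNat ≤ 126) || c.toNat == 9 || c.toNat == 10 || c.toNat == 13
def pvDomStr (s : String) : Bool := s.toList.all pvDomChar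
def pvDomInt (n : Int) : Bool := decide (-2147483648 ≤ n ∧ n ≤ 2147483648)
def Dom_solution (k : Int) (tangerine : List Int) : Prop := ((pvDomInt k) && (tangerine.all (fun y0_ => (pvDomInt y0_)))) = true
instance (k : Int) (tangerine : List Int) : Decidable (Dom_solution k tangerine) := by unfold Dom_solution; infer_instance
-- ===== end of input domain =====

-- B replaces A's per-distinct-value tangerine.count scan, comparison sort and backwards index walk
-- by a one-pass frequency dict, a histogram of count values (counting-sort style, no sort call)
-- and a batched greedy over count values descending, one ceiling division per bucket (objective: faster).

-- ===== PORT A =====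
-- A's 'while k > 0: k -= b[len(b)-t]; answer += 1; t += 1'.  The index len(b)-t may be negative
-- (Python wraps) or out of range (IndexError, = none here; those inputs are outside Pre_solution).
def solLoopA (b : List Int) (k answer : Int) (t : Nat) : Int :=
  if k ≤ 0 then answer
  else
    match h : PySem.List.pyGet? b ((b.length : Int) - (t : Int)) with
    | none => answer   -- IndexError in Python; excluded by Pre_solution
    | some c => solLoopA b (k - c) (answer + 1) (t + 1)
termination_by 2 * b.length + 1 - t
decreasing_by
  have hin : PySem.Raise.InRange b.length ((b.length : Int) - (t : Int)) := by
    by_contra hc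
    rw [← PySem.List.pyGet?_eq_none_iff] at hc
    simp [hc] at h
  simp [PySem.Raise.InRange] at hin
  omega

def solution (k : Int) (tangerine : List Int) : Int :=
  -- a = set(tangerine); b = [tangerine.count(i) for i in a]; b.sort()
  -- (b is sorted immediately after, so the result does not depend on Python's set iteration order)
  let a : PySem.Set Int := PySem.Set.ofList tangerine
  let b : List Int := a.foldl (fun acc i => acc ++ [(tangerine.count i : Int)]) []
  let bs := PySem.List.sorted b (fun x => x) false
  solLoopA bs k 0 1

-- ===== PORT B =====
-- 'while c > 0 and k > 0: m = buckets[c]; if m != 0: t = min(m, -(-k // c)); answer += t; k -= t*c; c -= 1'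
-- (the Python locals m and t are inlined; -(-k // c) is the ceiling division, ported with PySem.Int.floordiv)
def altLoop (buckets : List Int) : Nat → Int → Int → Int
  | 0, _, ans => ans
  | c + 1, k, ans =>
    if k ≤ 0 then ans
    else if buckets.getD (c + 1) 0 ≠ 0 then
      altLoop buckets c
        (k - min (buckets.getD (c + 1) 0) (-(PySem.Int.floordiv (-k) ((c : Int) + 1))) * ((c : Int) + 1))
        (ans + min (buckets.getD (c + 1) 0) (-(PySem.Int.floordiv (-k) ((c : Int) + 1))))
    else altLoop buckets c k ans

def solution_alt (k : Int) (tangerine : List Int) : Int :=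
  let freq := tangerine.foldl (fun d x => d.insert x (d.getD x 0 + 1))
    (PySem.Dict.empty : PySem.Dict Int Int)
  -- buckets = [0]*(len+1); for c in freq.values(): buckets[c] += 1
  let buckets := freq.values.foldl (fun bs c => bs.set c.toNat (bs.getD c.toNat 0 + 1))
    (List.replicate (tangerine.length + 1) (0 : Int))
  altLoop buckets tangerine.length k 0

-- ===== PRECONDITION & SPEC =====
-- A returns unless the while loop walks off b: it raises IndexError iff k > 0 and (tangerine is
-- empty or k > 2*len(tangerine), the total of one full pass plus one wrapped pass); those inputs
-- are excluded here (B returns the number of distinct sizes there, 0 for the empty list).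
def Pre_solution (k : Int) (tangerine : List Int) : Prop :=
  k ≤ 0 ∨ (tangerine ≠ [] ∧ k ≤ 2 * (tangerine.length : Int))
instance (k : Int) (tangerine : List Int) : Decidable (Pre_solution k tangerine) := by
  unfold Pre_solution; infer_instance

def pvWitness_solution : Int × List Int := (3, [1, 1, 2])

-- When len(tangerine) < k (and A still returns, k ≤ 2*len), A's index len(b)-t goes negative and
-- wraps, counting some kinds twice, so A returns more than the number of distinct sizes; B returns
-- the number of distinct sizes, the intended 'take every kind' answer.
def D_solution (k : Int) (tangerine : List Int) : Prop := (tangerine.length : Int) < k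
instance (k : Int) (tangerine : List Int) : Decidable (D_solution k tangerine) := by
  unfold D_solution; infer_instance

def Spec_solution (k : Int) (tangerine : List Int) (out : Int) : Prop :=
  ¬ D_solution k tangerine → out = solution_alt k tangerine
instance (k : Int) (tangerine : List Int) (out : Int) : Decidable (Spec_solution k tangerine out) := by
  unfold Spec_solution; infer_instance

def pvDiffWitness_solution : Int × List Int := (2, [5])
def pvDiffWitnessOut_solution : Int × Int := (2, 1)

-- ===== CLAIM (what is proved, stated in full; the proofs are below) =====
def Claim_unchanged_solution : Prop := ∀ (k : Int) (tangerine : List Int), Dom_solution k tangerine → Pre_solution k tangerine → Spec_solution k tangerine (solution k tangerine)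
def Claim_changed_solution : Prop := Dom_solution (pvDiffWitness_solution.1) (pvDiffWitness_solution.2) ∧ Pre_solution (pvDiffWitness_solution.1) (pvDiffWitness_solution.2) ∧ D_solution (pvDiffWitness_solution.1) (pvDiffWitness_solution.2) ∧ solution (pvDiffWitness_solution.1) (pvDiffWitness_solution.2) = pvDiffWitnessOut_solution.1 ∧ solution_alt (pvDiffWitness_solution.1) (pvDiffWitness_solution.2) = pvDiffWitnessOut_solution.2 ∧ pvDiffWitnessOut_solution.1 ≠ pvDiffWitnessOut_solution.2
def Claim_exact_solution : Prop := ∀ (k : Int) (tangerine : List Int), Dom_solution k tangerine → Pre_solution k tangerine → D_solution k tangerine → solution k tangerine ≠ solution_alt k tangerine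

-- ===== LEMMAS AND PROOFS =====

-- gl: reference greedy over an explicit (descending) list of counts, used only by the proofs to
-- relate A's index walk on the ascending sort to B's bucket walk on the histogram.
def gl (k ans : Int) : List Int → Int
  | [] => ans
  | c :: rest => if k ≤ 0 then ans else gl (k - c) (ans + 1) rest

-- the explicit descending list a histogram denotes: buckets[c] copies of c, c from high to low
def descList (buckets : List Int) : Nat → List Int
  | 0 => []
  | c + 1 => List.replicate (buckets.getD (c + 1) 0).toNat ((c : Int) + 1) ++ descList buckets c

lemma gl_nonpos (k ans : Int) (l : List Int) (h : k ≤ 0) : gl k ans l = ans := by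
  cases l <;> simp [gl, h]

lemma altLoop_nonpos (buckets : List Int) (c : Nat) (k ans : Int) (h : k ≤ 0) :
    altLoop buckets c k ans = ans := by
  cases c <;> simp [altLoop, h]

-- ceiling-division bounds for -(-k // c)
lemma cd_bounds (k c : Int) (hc : 0 < c) :
    ((-(PySem.Int.floordiv (-k) c)) - 1) * c < k ∧ k ≤ (-(PySem.Int.floordiv (-k) c)) * c :=
  (PySem.Int.neg_floordiv_neg_eq_iff_of_pos hc).mp rfl

lemma solLoopA_stop (b : List Int) (k ans : Int) (t : Nat) (h : k ≤ 0) :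
    solLoopA b k ans t = ans := by
  rw [solLoopA]; simp [h]

lemma solLoopA_step (b : List Int) (k ans : Int) (t : Nat) (c : Int) (hk : ¬ k ≤ 0)
    (h : PySem.List.pyGet? b ((b.length : Int) - (t : Int)) = some c) :
    solLoopA b k ans t = solLoopA b (k - c) (ans + 1) (t + 1) := by
  rw [solLoopA, if_neg hk, h]

lemma solLoopA_ge (b : List Int) (k ans : Int) (t : Nat) : ans ≤ solLoopA b k ans t := by
  fun_induction solLoopA b k ans t <;> omega

-- sorted(xs, reverse=True) on Ints with the identity key is the reverse of sorted(xs).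
lemma sorted_rev_eq_reverse (xs : List Int) :
    PySem.List.sorted xs (fun x => x) true = (PySem.List.sorted xs (fun x => x) false).reverse := by
  have h : (PySem.List.sorted xs (fun x => x) true).reverse
      = PySem.List.sorted xs (fun x => x) false := by
    apply PySem.List.eq_of_perm_of_pairwise_le_of_injective (fun x => x)
      (fun a b hab => hab)
    · exact ((List.reverse_perm _).trans (PySem.List.sorted_perm xs (fun x => x) true)).trans
        (PySem.List.sorted_perm xs (fun x => x) false).symm
    · exact List.Pairwise.reverse (PySem.List.sorted_pairwise_rev xs (fun x => x))
    · exact PySem.List.sorted_pairwise xs (fun x => x)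
  calc PySem.List.sorted xs (fun x => x) true
      = (PySem.List.sorted xs (fun x => x) true).reverse.reverse := (List.reverse_reverse _).symm
    _ = (PySem.List.sorted xs (fun x => x) false).reverse := by rw [h]

-- A's unsorted count list equals B's freq.values.
lemma counts_eq (tangerine : List Int) :
    (PySem.Set.ofList tangerine).foldl (fun acc i => acc ++ [(tangerine.count i : Int)]) []
      = (tangerine.foldl (fun d x => d.insert x (d.getD x 0 + 1))
          (PySem.Dict.empty : PySem.Dict Int Int)).values := by
  rw [PySem.Dict.foldl_insert_getD_add_one_eq_counter]
  rw [PySem.List.foldl_append_singleton_eq_map]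
  simp [PySem.Dict.values, PySem.Dict.items_counter, List.map_map, Function.comp]

-- the counts of the distinct elements sum to the length
lemma sum_counts (xs : List Int) :
    ((PySem.Set.ofList xs).map (fun v => (xs.count v : Int))).sum = (xs.length : Int) := by
  have hnat : ((PySem.Set.ofList xs).map (fun v => xs.count v)).sum = xs.length := by
    rw [← List.sum_toFinset _ (PySem.Set.nodup_ofList xs)]
    have hfs : (PySem.Set.ofList xs : List Int).toFinset = xs.toFinset := by
      ext a; simp [PySem.Set.mem_ofList]
    rw [hfs]
    exact List.sum_toFinset_count_eq_length xs
  calc ((PySem.Set.ofList xs).map (fun v => (xs.count v : Int))).sum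
      = (((PySem.Set.ofList xs).map (fun v => xs.count v)).sum : Int) := by
        push_cast [List.map_map, Function.comp]; rfl
    _ = (xs.length : Int) := by rw [hnat]

-- the greedy gl swallows a run of m equal positive counts c in one batched step
lemma gl_replicate (c : Int) (hc : 0 < c) (rest : List Int) :
    ∀ (m : Nat) (k ans : Int), 0 < k →
      gl k ans (List.replicate m c ++ rest) =
        if k ≤ (m : Int) * c then ans + (-(PySem.Int.floordiv (-k) c))
        else gl (k - (m : Int) * c) (ans + (m : Int)) rest := by
  intro m
  induction m with
  | zero =>
    intro k ans hk
    rw [if_neg (by simpa using hk)]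
    simp
  | succ m ih =>
    intro k ans hk
    obtain ⟨hd1, hd2⟩ := cd_bounds k c hc
    set d := -(PySem.Int.floordiv (-k) c) with hd
    have hstep : List.replicate (m + 1) c ++ rest = c :: (List.replicate m c ++ rest) := by
      simp [List.replicate_succ]
    rw [hstep, gl, if_neg (by omega)]
    by_cases hkc : k - c ≤ 0
    · rw [gl_nonpos _ _ _ hkc]
      have hmc : (0 : Int) ≤ (m : Int) * c := mul_nonneg (by positivity) (le_of_lt hc)
      rw [if_pos (by push_cast; nlinarith)]
      have hle : d ≤ 1 := by
        have h1 : (d - 1) * c < 1 * c := by nlinarith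
        have := lt_of_mul_lt_mul_right h1 (le_of_lt hc)
        omega
      have hge : 1 ≤ d := by
        have h1 : (0 : Int) * c < d * c := by nlinarith
        have := lt_of_mul_lt_mul_right h1 (le_of_lt hc)
        omega
      have : d = 1 := le_antisymm hle (by omega)
      omega
    · push Not at hkc
      rw [ih (k - c) (ans + 1) (by omega)]
      have hd' : -(PySem.Int.floordiv (-(k - c)) c) = d - 1 := by
        rw [PySem.Int.neg_floordiv_neg_eq_iff_of_pos hc]
        constructor <;> nlinarith
      rw [hd']
      have hexp : ((m + 1 : Nat) : Int) * c = (m : Int) * c + c := by push_cast; ring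
      by_cases h1 : k - c ≤ (m : Int) * c
      · rw [if_pos h1, if_pos (by rw [hexp]; omega)]
        omega
      · rw [if_neg h1, if_neg (by rw [hexp]; omega)]
        congr 1 <;> push_cast <;> ring

-- B's bucket walk equals the greedy gl over the explicit descending list of counts
lemma altLoop_eq_gl (buckets : List Int) (hpos : ∀ i : Nat, 0 ≤ buckets.getD i 0) :
    ∀ (c : Nat) (k ans : Int), altLoop buckets c k ans = gl k ans (descList buckets c) := by
  intro c
  induction c with
  | zero => intro k ans; simp [altLoop, descList, gl]
  | succ c ih =>
    intro k ans
    by_cases hk : k ≤ 0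
    · rw [altLoop_nonpos _ _ _ _ hk, gl_nonpos _ _ _ hk]
    · have hm0 : 0 ≤ buckets.getD (c + 1) 0 := hpos (c + 1)
      set m := buckets.getD (c + 1) 0 with hm
      have hcpos : (0 : Int) < (c : Int) + 1 := by positivity
      have hcast : ((m.toNat : Nat) : Int) = m := Int.toNat_of_nonneg hm0
      rw [show descList buckets (c + 1)
            = List.replicate m.toNat ((c : Int) + 1) ++ descList buckets c from by
          rw [descList]]
      rw [gl_replicate ((c : Int) + 1) hcpos _ m.toNat k ans (by omega), hcast]
      obtain ⟨hd1, hd2⟩ := cd_bounds k ((c : Int) + 1) hcpos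
      set d := -(PySem.Int.floordiv (-k) ((c : Int) + 1)) with hdd
      by_cases hmz : m = 0
      · rw [if_neg (by rw [hmz]; simpa using hk)]
        rw [show altLoop buckets (c + 1) k ans = altLoop buckets c k ans from by
          rw [altLoop, if_neg hk, if_neg (by rw [← hm, hmz]; simp)]]
        rw [ih, hmz]
        norm_num
      · rw [show altLoop buckets (c + 1) k ans
            = altLoop buckets c (k - min m d * ((c : Int) + 1)) (ans + min m d) from by
          rw [altLoop, if_neg hk, if_pos (by rw [← hm]; exact hmz)]]
        by_cases hcase : k ≤ m * ((c : Int) + 1)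
        · have hdm : d ≤ m := by
            have h1 : (d - 1) * ((c : Int) + 1) < m * ((c : Int) + 1) := by nlinarith
            have := lt_of_mul_lt_mul_right h1 (le_of_lt hcpos)
            omega
          rw [min_eq_right hdm, if_pos hcase]
          exact altLoop_nonpos _ _ _ _ (by nlinarith)
        · have hmd : m ≤ d := by
            have h1 : m * ((c : Int) + 1) < d * ((c : Int) + 1) := by nlinarith
            have := lt_of_mul_lt_mul_right h1 (le_of_lt hcpos)
            omega
          rw [min_eq_left hmd, if_neg hcase, ih]

-- the histogram fold: each slot i ends at its start value plus the number of i's in vs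
lemma hist_getD (n : Nat) :
    ∀ (vs : List Int), (∀ v ∈ vs, 1 ≤ v ∧ v ≤ (n : Int)) →
    ∀ (bs0 : List Int), bs0.length = n + 1 →
      (vs.foldl (fun bs c => bs.set c.toNat (bs.getD c.toNat 0 + 1)) bs0).length = n + 1 ∧
      ∀ i : Nat, (vs.foldl (fun bs c => bs.set c.toNat (bs.getD c.toNat 0 + 1)) bs0).getD i 0
        = bs0.getD i 0 + (vs.count (i : Int) : Int) := by
  intro vs
  induction vs with
  | nil => intro _ bs0 hlen; exact ⟨hlen, fun i => by simp⟩
  | cons v vs ih =>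
    intro hmem bs0 hlen
    have hv := hmem v (by simp)
    have hvn : v.toNat < bs0.length := by omega
    rw [List.foldl_cons]
    obtain ⟨hL, hG⟩ := ih (fun x hx => hmem x (by simp [hx]))
      (bs0.set v.toNat (bs0.getD v.toNat 0 + 1)) (by simp [hlen])
    refine ⟨hL, fun i => ?_⟩
    rw [hG i]
    by_cases hiv : i = v.toNat
    · subst hiv
      have hveq : ((v.toNat : Nat) : Int) = v := by omega
      have hbeq : (v == ((v.toNat : Nat) : Int)) = true := by rw [hveq]; simp
      rw [List.getD_eq_getElem?_getD, List.getElem?_set_self (by omega),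
        List.count_cons, hbeq, List.getD_eq_getElem?_getD]
      simp only [Option.getD_some, if_true]
      push_cast
      omega
    · have hvne : v ≠ (i : Int) := by omega
      have hbeq : (v == (i : Int)) = false := by simpa using hvne
      rw [List.getD_eq_getElem?_getD,
        List.getElem?_set_ne (show ¬ v.toNat = i from fun h => hiv h.symm),
        List.count_cons, hbeq, List.getD_eq_getElem?_getD]
      simp

-- occurrence count of each value in the explicit descending list
lemma count_descList (buckets : List Int) :
    ∀ (c : Nat) (v : Int),
      (descList buckets c).count v
        = if 1 ≤ v ∧ v ≤ (c : Int) then (buckets.getD v.toNat 0).toNat else 0 := by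
  intro c
  induction c with
  | zero => intro v; rw [if_neg (by omega)]; simp [descList]
  | succ c ih =>
    intro v
    rw [descList, List.count_append, List.count_replicate, ih v]
    by_cases hv : v = (c : Int) + 1
    · have hbeq : (((c : Int) + 1) == v) = true := by rw [hv]; simp
      rw [hbeq, if_pos rfl, if_neg (by omega), if_pos (by omega)]
      have hvt : v.toNat = c + 1 := by omega
      rw [hvt]
      omega
    · have hbeq : (((c : Int) + 1) == v) = false := by simpa using fun h => hv h.symm
      rw [hbeq, if_neg (by simp)]
      by_cases h1 : 1 ≤ v ∧ v ≤ (c : Int)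
      · rw [if_pos h1, if_pos (by push_cast; omega)]
        simp
      · rw [if_neg h1, if_neg (by push_cast; omega)]

lemma mem_descList (buckets : List Int) :
    ∀ (c : Nat) (x : Int), x ∈ descList buckets c → 1 ≤ x ∧ x ≤ (c : Int) := by
  intro c
  induction c with
  | zero => intro x hx; simp [descList] at hx
  | succ c ih =>
    intro x hx
    rw [descList, List.mem_append] at hx
    rcases hx with hx | hx
    · have := List.eq_of_mem_replicate hx
      omega
    · have := ih x hx
      push_cast
      omega

lemma pairwise_descList (buckets : List Int) :
    ∀ (c : Nat), (descList buckets c).Pairwise (fun a b => b ≤ a) := by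
  intro c
  induction c with
  | zero => simp [descList]
  | succ c ih =>
    rw [descList, List.pairwise_append]
    refine ⟨List.pairwise_replicate.mpr (by simp), ih, ?_⟩
    intro a ha b hb
    have haa := List.eq_of_mem_replicate ha
    have hbb := (mem_descList buckets c b hb).2
    omega

-- the descending histogram read-out IS sorted(vs, reverse=True)
lemma descList_eq_sorted (n : Nat) (vs : List Int) (h : ∀ v ∈ vs, 1 ≤ v ∧ v ≤ (n : Int)) :
    descList (vs.foldl (fun bs c => bs.set c.toNat (bs.getD c.toNat 0 + 1))
        (List.replicate (n + 1) (0 : Int))) n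
      = PySem.List.sorted vs (fun x => x) true := by
  set buckets := vs.foldl (fun bs c => bs.set c.toNat (bs.getD c.toNat 0 + 1))
    (List.replicate (n + 1) (0 : Int)) with hb
  obtain ⟨hL, hG⟩ := hist_getD n vs h (List.replicate (n + 1) (0 : Int)) (by simp)
  have hperm : (descList buckets n).Perm vs := by
    rw [List.perm_iff_count]
    intro v
    rw [count_descList]
    by_cases hv : 1 ≤ v ∧ v ≤ (n : Int)
    · rw [if_pos hv, hG v.toNat]
      have : ((v.toNat : Nat) : Int) = v := by omega
      rw [this]
      simp
    · rw [if_neg hv]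
      symm
      rw [List.count_eq_zero]
      intro hmem
      exact hv (h v hmem)
  have key : (descList buckets n).reverse = PySem.List.sorted vs (fun x => x) false := by
    apply PySem.List.eq_of_perm_of_pairwise_le_of_injective (fun x => x) (fun a b hab => hab)
    · exact ((List.reverse_perm _).trans hperm).trans
        (PySem.List.sorted_perm vs (fun x => x) false).symm
    · exact List.Pairwise.reverse (pairwise_descList buckets n)
    · exact PySem.List.sorted_pairwise vs (fun x => x)
  rw [sorted_rev_eq_reverse, ← key, List.reverse_reverse]

-- master bridge: B equals the greedy gl over the counts sorted descending
lemma alt_eq_gl_sorted (k : Int) (tangerine : List Int) :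
    solution_alt k tangerine
      = gl k 0 (PySem.List.sorted
          ((tangerine.foldl (fun d x => d.insert x (d.getD x 0 + 1))
            (PySem.Dict.empty : PySem.Dict Int Int)).values) (fun x => x) true) := by
  have hvals : (tangerine.foldl (fun d x => d.insert x (d.getD x 0 + 1))
      (PySem.Dict.empty : PySem.Dict Int Int)).values
      = (PySem.Set.ofList tangerine).map (fun v => (tangerine.count v : Int)) := by
    rw [← counts_eq, PySem.List.foldl_append_singleton_eq_map, List.nil_append]
  set vs := (tangerine.foldl (fun d x => d.insert x (d.getD x 0 + 1))
    (PySem.Dict.empty : PySem.Dict Int Int)).values with hvs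
  have hbnd : ∀ v ∈ vs, 1 ≤ v ∧ v ≤ (tangerine.length : Int) := by
    rw [hvals]
    intro v hv
    obtain ⟨x, hx, rfl⟩ := List.mem_map.mp hv
    have hmem : x ∈ tangerine := (PySem.Set.mem_ofList tangerine x).mp hx
    constructor
    · exact_mod_cast List.count_pos_iff.mpr hmem
    · exact_mod_cast List.count_le_length
  obtain ⟨hL, hG⟩ := hist_getD tangerine.length vs hbnd
    (List.replicate (tangerine.length + 1) (0 : Int)) (by simp)
  have hpos : ∀ i : Nat,
      0 ≤ (vs.foldl (fun bs c => bs.set c.toNat (bs.getD c.toNat 0 + 1))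
        (List.replicate (tangerine.length + 1) (0 : Int))).getD i 0 := by
    intro i
    rw [hG i]
    simp
  show altLoop _ tangerine.length k 0 = _
  rw [altLoop_eq_gl _ hpos tangerine.length k 0,
    descList_eq_sorted tangerine.length vs hbnd]

-- A's indexed walk from the top of the ascending list = the greedy gl over the reversed
-- (descending) list, as long as k is at most the sum of what remains.
lemma loopA_eq_gl (bs : List Int) (l : List Int) : ∀ (j : Nat) (k ans : Int),
    bs.reverse.drop j = l → k ≤ l.sum → solLoopA bs k ans (j + 1) = gl k ans l := by
  induction l with
  | nil =>
    intro j k ans _ hk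
    rw [solLoopA]
    simp only [List.sum_nil] at hk
    simp [hk, gl]
  | cons c rest ih =>
    intro j k ans hdrop hk
    by_cases hk0 : k ≤ 0
    · rw [solLoopA]; simp [hk0, gl]
    · have hj : j < bs.length := by
        by_contra hge
        rw [List.drop_eq_nil_of_le (by simpa using Nat.le_of_not_lt hge)] at hdrop
        exact List.cons_ne_nil c rest hdrop.symm
      have hidx : (bs.length : Int) - ((j + 1 : Nat) : Int) = ((bs.length - 1 - j : Nat) : Int) := by
        omega
      have hget : PySem.List.pyGet? bs ((bs.length : Int) - ((j + 1 : Nat) : Int)) = some c := by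
        rw [hidx, PySem.List.pyGet?_natCast]
        have h0 : (bs.reverse.drop j)[(0 : Nat)]? = some c := by rw [hdrop]; rfl
        rw [List.getElem?_drop] at h0
        simp only [Nat.add_zero] at h0
        rw [List.getElem?_reverse (by simpa using hj)] at h0
        exact h0
      rw [solLoopA, if_neg hk0, hget]
      have hd2 : bs.reverse.drop (j + 1) = rest := by
        have h0 : (bs.reverse.drop j).drop 1 = rest := by rw [hdrop]; rfl
        rw [List.drop_drop] at h0
        simpa [Nat.add_comm] using h0
      have := ih (j + 1) (k - c) (ans + 1) hd2 (by simp at hk ⊢; omega)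
      simpa [gl, hk0] using this

-- main equivalence outside D_
lemma solution_eq_alt (k : Int) (tangerine : List Int)
    (hk : k ≤ (tangerine.length : Int)) : solution k tangerine = solution_alt k tangerine := by
  rw [alt_eq_gl_sorted]
  simp only [solution]
  rw [← counts_eq]
  set b : List Int :=
    (PySem.Set.ofList tangerine).foldl (fun acc i => acc ++ [(tangerine.count i : Int)]) [] with hb
  rw [sorted_rev_eq_reverse]
  apply loopA_eq_gl _ _ 0 k 0 List.drop_zero
  have hsum : (PySem.List.sorted b (fun x => x) false).reverse.sum = b.sum := by
    rw [List.sum_reverse]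
    exact ((PySem.List.sorted_perm b (fun x => x) false).sum_eq)
  rw [hsum, hb, PySem.List.foldl_append_singleton_eq_map, List.nil_append, sum_counts]
  exact hk

lemma loopA_lb (bs : List Int) (hbs : bs ≠ []) (hpos : ∀ x ∈ bs, 0 < x) (l : List Int) :
    ∀ (j : Nat) (k ans : Int), j ≤ bs.length → bs.reverse.drop j = l → l.sum < k →
    ans + ((bs.length - j : Nat) : Int) + 1 ≤ solLoopA bs k ans (j + 1) := by
  induction l with
  | nil =>
    intro j k ans hj hdrop hk
    have hjl : j = bs.length := by
      have := List.drop_eq_nil_iff.mp hdrop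
      simp at this
      omega
    subst hjl
    have hidx : (bs.length : Int) - ((bs.length + 1 : Nat) : Int) = -1 := by omega
    have hget : PySem.List.pyGet? bs ((bs.length : Int) - ((bs.length + 1 : Nat) : Int))
        = some (bs.getLast hbs) := by
      rw [hidx, PySem.List.pyGet?_neg_one, List.getLast?_eq_getLast_of_ne_nil hbs]
    have hk0 : ¬ k ≤ 0 := by simp at hk; omega
    rw [solLoopA_step bs k ans (bs.length + 1) _ hk0 hget]
    have := solLoopA_ge bs (k - bs.getLast hbs) (ans + 1) (bs.length + 1 + 1)
    simp
    omega
  | cons c rest ih =>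
    intro j k ans hj hdrop hk
    have hjlt : j < bs.length := by
      by_contra hge
      rw [List.drop_eq_nil_of_le (by simpa using Nat.le_of_not_lt hge)] at hdrop
      exact List.cons_ne_nil c rest hdrop.symm
    have hmem : ∀ x ∈ c :: rest, x ∈ bs := by
      intro x hx
      have : x ∈ bs.reverse.drop j := by rw [hdrop]; exact hx
      exact List.mem_reverse.mp (List.mem_of_mem_drop this)
    have hcpos : 0 < c := hpos c (hmem c (by simp))
    have hrest : (0 : Int) ≤ rest.sum :=
      List.sum_nonneg (fun x hx => le_of_lt (hpos x (hmem x (by simp [hx]))))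
    have hk0 : ¬ k ≤ 0 := by simp only [List.sum_cons] at hk; omega
    have hidx : (bs.length : Int) - ((j + 1 : Nat) : Int) = ((bs.length - 1 - j : Nat) : Int) := by
      omega
    have hget : PySem.List.pyGet? bs ((bs.length : Int) - ((j + 1 : Nat) : Int)) = some c := by
      rw [hidx, PySem.List.pyGet?_natCast]
      have h0 : (bs.reverse.drop j)[(0 : Nat)]? = some c := by rw [hdrop]; rfl
      rw [List.getElem?_drop] at h0
      simp only [Nat.add_zero] at h0
      rw [List.getElem?_reverse (by simpa using hjlt)] at h0
      exact h0
    rw [solLoopA_step bs k ans (j + 1) c hk0 hget]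
    have hd2 : bs.reverse.drop (j + 1) = rest := by
      have h0 : (bs.reverse.drop j).drop 1 = rest := by rw [hdrop]; rfl
      rw [List.drop_drop] at h0
      simpa [Nat.add_comm] using h0
    have := ih (j + 1) (k - c) (ans + 1) hjlt hd2
      (by simp only [List.sum_cons] at hk; omega)
    have hcast : ((bs.length - j : Nat) : Int) = ((bs.length - (j + 1) : Nat) : Int) + 1 := by
      omega
    omega

lemma gl_full (l : List Int) : ∀ (k ans : Int), (∀ x ∈ l, 0 < x) → l.sum < k →
    gl k ans l = ans + l.length := by
  induction l with
  | nil => intro k ans _ _; simp [gl]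
  | cons c rest ih =>
    intro k ans hpos hk
    have hrest : (0 : Int) ≤ rest.sum :=
      List.sum_nonneg (fun x hx => le_of_lt (hpos x (by simp [hx])))
    have hcpos : 0 < c := hpos c (by simp)
    have hk0 : ¬ k ≤ 0 := by simp only [List.sum_cons] at hk; omega
    rw [gl, if_neg hk0, ih (k - c) (ans + 1) (fun x hx => hpos x (by simp [hx]))
      (by simp only [List.sum_cons] at hk; omega)]
    simp
    omega

-- ===== VERDICT (by name: the statement is the Claim_ definition above) =====
theorem solution_spec : Claim_unchanged_solution := by
  intro k tangerine _ _ hD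
  unfold D_solution at hD
  exact solution_eq_alt k tangerine (by omega)

theorem solution_changed : Claim_changed_solution := by
  unfold Claim_changed_solution
  refine ⟨by decide, by decide, by decide, ?_, by decide, by decide⟩
  show solution 2 [5] = 2
  have h0 : solution 2 [5] = solLoopA [1] 2 0 1 := rfl
  rw [h0,
    solLoopA_step [1] 2 0 1 1 (by norm_num) (by decide),
    solLoopA_step [1] (2 - 1) (0 + 1) 2 1 (by norm_num) (by decide),
    solLoopA_stop [1] (2 - 1 - 1) (0 + 1 + 1) 3 (by norm_num)]
  norm_num

theorem solution_tight : Claim_exact_solution := by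
  intro k tangerine _ hpre hD
  unfold D_solution at hD
  have hne : tangerine ≠ [] := by
    rcases hpre with h0 | ⟨hne, _⟩
    · exfalso; omega
    · exact hne
  rw [alt_eq_gl_sorted]
  simp only [solution]
  rw [← counts_eq]
  set b : List Int :=
    (PySem.Set.ofList tangerine).foldl (fun acc i => acc ++ [(tangerine.count i : Int)]) []
    with hb
  set bs : List Int := PySem.List.sorted b (fun x => x) false with hbs
  have hbmap : b = (PySem.Set.ofList tangerine).map (fun v => (tangerine.count v : Int)) := by
    rw [hb, PySem.List.foldl_append_singleton_eq_map, List.nil_append]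
  have hbpos : ∀ x ∈ b, 0 < x := by
    intro x hx
    rw [hbmap] at hx
    obtain ⟨v, hv, rfl⟩ := List.mem_map.mp hx
    have : v ∈ tangerine := (PySem.Set.mem_ofList tangerine v).mp hv
    exact_mod_cast List.count_pos_iff.mpr this
  have hbspos : ∀ x ∈ bs, 0 < x := by
    intro x hx
    exact hbpos x ((PySem.List.mem_sorted b (fun y => y) false x).mp hx)
  have hbne : b ≠ [] := by
    rw [hbmap]
    intro hnil
    have : PySem.Set.ofList tangerine = [] := by simpa using hnil
    rcases List.exists_mem_of_ne_nil tangerine hne with ⟨v, hv⟩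
    have : v ∈ PySem.Set.ofList tangerine := (PySem.Set.mem_ofList tangerine v).mpr hv
    simp_all
  have hbsne : bs ≠ [] := by
    rw [hbs]
    intro hnil
    rw [PySem.List.sorted_eq_nil_iff] at hnil
    exact hbne hnil
  have hsum : bs.reverse.sum = (tangerine.length : Int) := by
    rw [List.sum_reverse, hbs]
    rw [(PySem.List.sorted_perm b (fun x => x) false).sum_eq, hbmap, sum_counts]
  have hA := loopA_lb bs hbsne hbspos bs.reverse 0 k 0 (by omega) rfl (by rw [hsum]; omega)
  rw [sorted_rev_eq_reverse]
  have hB := gl_full bs.reverse k 0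
    (fun x hx => hbspos x (List.mem_reverse.mp hx)) (by rw [hsum]; omega)
  rw [hB]
  intro hEq
  rw [hEq, List.length_reverse] at hA
  omega
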